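-- pv_equiv track=rewrite | github.com/Hyphern/Rummikub | Rummikub-Carden/testing_files/worm/redundant/main.py | get_group_options
-- ===== SOURCE A (Python) =====
-- from itertools import combinations
--
-- def get_group_options(board, row, col):
--     """Get all group combinations that include this tile."""
--     available = [r for r in range(4) if board[r][col] > 0]
--     if len(available) < 3:
--         return []
--
--     options = []
--     for size in range(3, len(available) + 1):
--         for combo in combinations(available, size):
--             if row in combo:
--                 options.append(list(combo))
--     return options
-- ===== SOURCE B (Python) =====
-- def get_group_options(board, row, col):
--     """Get all group combinations that include this tile."""
--     avail = {r for r in range(4) if board[r][col] > 0}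
--     groups = []
--     for m in range(16):
--         group = [r for r in range(4) if m // 2 ** r % 2 == 1]
--         if len(group) >= 3 and all(r in avail for r in group) and row in group:
--             groups.append(group)
--     groups.sort(key=lambda g: (len(g), g))
--     return groups
-- ===== Notes on version B (the rewrite author's own statement) =====
-- stated objective: alternative
-- what changed: B drops itertools.combinations and the 'row in combo' filter entirely: it enumerates the 16 bitmasks over the four rows, keeps those that are all-available groups of size >= 3 containing row, and sorts the collected groups by (size, group) to restore A's (size, lexicographic) emission order.
import Mathlib
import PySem

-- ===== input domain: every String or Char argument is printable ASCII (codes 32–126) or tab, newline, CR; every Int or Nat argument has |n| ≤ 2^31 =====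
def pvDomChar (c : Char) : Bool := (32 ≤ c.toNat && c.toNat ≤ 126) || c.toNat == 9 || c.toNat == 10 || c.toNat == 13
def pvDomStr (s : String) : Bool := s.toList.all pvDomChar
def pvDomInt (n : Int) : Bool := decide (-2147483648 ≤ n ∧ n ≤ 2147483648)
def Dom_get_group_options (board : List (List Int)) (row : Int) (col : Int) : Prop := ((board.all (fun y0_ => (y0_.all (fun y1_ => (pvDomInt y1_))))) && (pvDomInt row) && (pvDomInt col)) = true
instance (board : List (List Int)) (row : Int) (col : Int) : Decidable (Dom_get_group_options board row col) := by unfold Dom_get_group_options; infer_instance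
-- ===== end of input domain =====

-- B replaces itertools.combinations + the 'row in combo' filter by a direct enumeration of
-- the 16 bitmasks over the four rows (keeping those that are available groups of size ≥ 3
-- containing row) followed by a (size, group) sort; objective: alternative decomposition.

-- ===== PORT A =====
-- itertools.combinations on a list, lexicographic order
def pyCombos : List Int → Nat → List (List Int)
  | _, 0 => [[]]
  | [], _ + 1 => []
  | x :: xs, k + 1 => (pyCombos xs k).map (fun c => x :: c) ++ pyCombos xs (k + 1)

def get_group_options (board : List (List Int)) (row : Int) (col : Int) : List (List Int) :=
  let available := (PySem.List.pyRange 0 4 1).filter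
    (fun r => decide (0 < (PySem.List.pyGet? ((PySem.List.pyGet? board r).getD []) col).getD 0))
  if available.length < 3 then []
  else
    (PySem.List.pyRange 3 ((available.length : Int) + 1) 1).foldl
      (fun options size =>
        options ++ (pyCombos available size.toNat).filter (fun combo => row ∈ combo)) []

-- ===== PORT B =====
def get_group_options_alt (board : List (List Int)) (row : Int) (col : Int) : List (List Int) :=
  let avail := PySem.Set.ofList ((PySem.List.pyRange 0 4 1).filter
    (fun r => decide (0 < (PySem.List.pyGet? ((PySem.List.pyGet? board r).getD []) col).getD 0)))
  let groups := (PySem.List.pyRange 0 16 1).foldl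
    (fun groups m =>
      -- 'm // 2 ** r % 2 == 1': m and r are ≥ 0 here, so PySem floordiv/mod are exact
      let group := (PySem.List.pyRange 0 4 1).filter
        (fun r => decide (PySem.Int.mod (PySem.Int.floordiv m (2 ^ r.toNat)) 2 = 1))
      if 3 ≤ group.length ∧ group.all (fun r => decide (r ∈ avail)) ∧ row ∈ group
      then groups ++ [group] else groups) []
  PySem.List.sorted2 groups (fun g => (g.length : Int)) (fun g => g) false

-- ===== PRECONDITION & SPEC =====
-- Pre_: board[r][col] must exist (no IndexError) for every r in range(4).
def Pre_get_group_options (board : List (List Int)) (row : Int) (col : Int) : Prop :=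
  ∀ r ∈ List.range 4,
    ((PySem.List.pyGet? board (r : Int)).bind (fun rw => PySem.List.pyGet? rw col)).isSome = true
instance (board : List (List Int)) (row : Int) (col : Int) : Decidable (Pre_get_group_options board row col) := by unfold Pre_get_group_options; infer_instance

def pvWitness_get_group_options : List (List Int) × Int × Int :=
  ([[1, 2], [3, 0], [5, 6], [7, 8]], 0, 0)

def Spec_get_group_options (board : List (List Int)) (row : Int) (col : Int) (out : List (List Int)) : Prop := out = get_group_options_alt board row col
instance (board : List (List Int)) (row : Int) (col : Int) (out : List (List Int)) : Decidable (Spec_get_group_options board row col out) := by unfold Spec_get_group_options; infer_instance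

-- ===== CLAIM (what is proved, stated in full; the proofs are below) =====
def Claim_equal_get_group_options : Prop := ∀ (board : List (List Int)) (row : Int) (col : Int), Dom_get_group_options board row col → Pre_get_group_options board row col → Spec_get_group_options board row col (get_group_options board row col)

-- ===== LEMMAS AND PROOFS =====

-- both ports as functions of the row-availability predicate q (q r = 'board[r][col] > 0')
def aCore (q : Int → Bool) (row : Int) : List (List Int) :=
  if ((PySem.List.pyRange 0 4 1).filter q).length < 3 then []
  else
    (PySem.List.pyRange 3 ((((PySem.List.pyRange 0 4 1).filter q).length : Int) + 1) 1).foldl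
      (fun options size =>
        options ++ (pyCombos ((PySem.List.pyRange 0 4 1).filter q) size.toNat).filter
          (fun combo => row ∈ combo)) []

def maskGroup (m : Int) : List Int :=
  (PySem.List.pyRange 0 4 1).filter
    (fun r => decide (PySem.Int.mod (PySem.Int.floordiv m (2 ^ r.toNat)) 2 = 1))

def bCore (q : Int → Bool) (row : Int) : List (List Int) :=
  PySem.List.sorted2
    ((PySem.List.pyRange 0 16 1).foldl
      (fun groups m =>
        if 3 ≤ (maskGroup m).length ∧
            (maskGroup m).all
              (fun r => decide (r ∈ PySem.Set.ofList ((PySem.List.pyRange 0 4 1).filter q))) ∧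
            row ∈ maskGroup m
        then groups ++ [maskGroup m] else groups) [])
    (fun g => (g.length : Int)) (fun g => g) false

-- every member of pyCombos xs k is made of elements of xs
theorem pyCombos_subset (xs : List Int) (k : Nat) (c : List Int)
    (hc : c ∈ pyCombos xs k) : ∀ x ∈ c, x ∈ xs := by
  induction xs generalizing k c with
  | nil =>
    cases k with
    | zero => simp [pyCombos] at hc; subst hc; simp
    | succ k => simp [pyCombos] at hc
  | cons a xs ih =>
    cases k with
    | zero => simp [pyCombos] at hc; subst hc; simp
    | succ k =>
      simp only [pyCombos, List.mem_append, List.mem_map] at hc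
      rcases hc with ⟨c', hc', rfl⟩ | hc
      · intro x hx
        rcases List.mem_cons.mp hx with rfl | hx
        · exact List.mem_cons_self
        · exact List.mem_cons_of_mem _ (ih k c' hc' x hx)
      · intro x hx
        exact List.mem_cons_of_mem _ (ih (k + 1) c hc x hx)

-- a fold that never appends leaves its accumulator unchanged (generic over the state)
theorem foldl_append_none {α β : Type} (l : List α) (f : α → List β)
    (h : ∀ x ∈ l, f x = []) (init : List β) :
    l.foldl (fun acc x => acc ++ f x) init = init := by
  induction l generalizing init with
  | nil => rfl
  | cons a l ih =>
    simp only [List.foldl_cons, h a List.mem_cons_self, List.append_nil]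
    exact ih (fun x hx => h x (List.mem_cons_of_mem _ hx)) init

-- a guarded collecting fold whose guard never fires is the identity on its accumulator
theorem foldl_ite_none {α β : Type} (l : List α) (C : α → Prop) [DecidablePred C]
    (g : α → β) (h : ∀ x ∈ l, ¬ C x) (init : List β) :
    l.foldl (fun acc x => if C x then acc ++ [g x] else acc) init = init := by
  induction l generalizing init with
  | nil => rfl
  | cons a l ih =>
    simp only [List.foldl_cons, if_neg (h a List.mem_cons_self)]
    exact ih (fun x hx => h x (List.mem_cons_of_mem _ hx)) init

-- a row outside {0,1,2,3} is in no combination, so A returns []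
theorem aCore_nil (q : Int → Bool) (row : Int) (hr : row ∉ ([0, 1, 2, 3] : List Int)) :
    aCore q row = [] := by
  unfold aCore
  split
  · rfl
  · apply foldl_append_none
    intro size _
    apply List.filter_eq_nil_iff.mpr
    intro c hc hm
    exact hr (List.mem_filter.mp (pyCombos_subset _ _ c hc row (by simpa using hm))).1
  -- (pyRange 0 4 1 = [0,1,2,3] definitionally inside mem_filter)

-- a row outside {0,1,2,3} is in no mask group, so B collects nothing and returns []
theorem bCore_nil (q : Int → Bool) (row : Int) (hr : row ∉ ([0, 1, 2, 3] : List Int)) :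
    bCore q row = [] := by
  unfold bCore
  rw [foldl_ite_none]
  · rfl
  · intro m _ hC
    have h2 := hC.2.2
    simp only [maskGroup] at h2
    rw [show PySem.List.pyRange 0 4 1 = [0, 1, 2, 3] from by decide] at h2
    exact hr (List.mem_filter.mp h2).1

theorem core_eq (q : Int → Bool) (row : Int) : aCore q row = bCore q row := by
  by_cases hr : row ∈ ([0, 1, 2, 3] : List Int)
  · fin_cases hr <;>
      (unfold aCore bCore
       have hp : PySem.List.pyRange 0 4 1 = [0, 1, 2, 3] := by decide
       rw [hp]
       by_cases h0 : q 0 <;> by_cases h1 : q 1 <;> by_cases h2 : q 2 <;> by_cases h3 : q 3 <;>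
         simp only [List.filter_cons, List.filter_nil, h0, h1, h2, h3] <;> decide)
  · rw [aCore_nil q row hr, bCore_nil q row hr]

-- ===== VERDICT (by name: the statement is the Claim_ definition above) =====
theorem get_group_options_spec : Claim_equal_get_group_options := by
  intro board row col _ _
  show get_group_options board row col = get_group_options_alt board row col
  exact core_eq
    (fun r => decide (0 < (PySem.List.pyGet? ((PySem.List.pyGet? board r).getD []) col).getD 0)) row
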